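-- pv_equiv track=rewrite | github.com/mhedenus/rdf2graphml | converter.py | _generate_unique_attr_names
-- ===== SOURCE A (Python) =====
-- def _generate_unique_attr_names(uris):
--     used_names = {}
--     mapping = {}
--     for uri in sorted(uris):
--         base_name = str(uri).split("/")[-1].split("#")[-1] or "attr"
--         if base_name not in used_names:
--             used_names[base_name] = 1
--             mapping[uri] = base_name
--         else:
--             mapping[uri] = f"{base_name} ({used_names[base_name]})"
--             used_names[base_name] += 1
--     return mapping
-- ===== SOURCE B (Python) =====
-- def _generate_unique_attr_names(uris):
--     ordered = sorted(uris)
--     groups = {}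
--     for uri in ordered:
--         base = str(uri).split("/")[-1].split("#")[-1] or "attr"
--         groups.setdefault(base, []).append(uri)
--     name_for = {}
--     for base, members in groups.items():
--         for i, uri in enumerate(members):
--             name_for[uri] = base if i == 0 else f"{base} ({i})"
--     return {uri: name_for[uri] for uri in dict.fromkeys(ordered)}
-- ===== Notes on version B (the rewrite author's own statement) =====
-- stated objective: alternative
-- what changed: A threads a running used_names counter through one stateful pass over sorted(uris); B has no counter: it groups the sorted URIs by base name into a dict of lists, assigns each group's names by enumerate over its members, and rebuilds the mapping in first-occurrence order via dict.fromkeys.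
import Mathlib
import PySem

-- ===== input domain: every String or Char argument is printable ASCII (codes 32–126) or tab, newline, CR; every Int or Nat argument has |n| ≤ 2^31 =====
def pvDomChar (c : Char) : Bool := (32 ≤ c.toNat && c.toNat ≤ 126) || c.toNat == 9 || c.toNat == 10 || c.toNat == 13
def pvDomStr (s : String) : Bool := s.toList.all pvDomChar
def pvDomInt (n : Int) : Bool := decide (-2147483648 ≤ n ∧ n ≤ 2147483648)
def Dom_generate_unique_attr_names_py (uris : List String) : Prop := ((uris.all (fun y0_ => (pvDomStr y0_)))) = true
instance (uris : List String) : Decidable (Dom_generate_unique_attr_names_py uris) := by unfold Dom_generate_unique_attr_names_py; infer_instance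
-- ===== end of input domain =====

-- B replaces A's single stateful pass with a running used_names counter by a three-stage
-- pipeline with no counter: group the sorted URIs by base name into a dict of lists,
-- name each group's members by enumerate, then rebuild the mapping in first-occurrence
-- order via dict.fromkeys — objective: alternative decomposition (same cost, not faster).


-- ===== PORT A =====
-- str(uri).split("/")[-1].split("#")[-1] or "attr"   (split with a non-empty separator never
-- raises and returns a non-empty list, so [-1] is total; pyGetD's default is never used)
def pvBaseName (uri : String) : String :=
  let b := PySem.List.pyGetD
    ((PySem.Str.split? (PySem.List.pyGetD ((PySem.Str.split? uri "/").getD []) (-1) "") "#").getD []) (-1) ""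
  if b = "" then "attr" else b

def pvStepA (st : PySem.Dict String Int × PySem.Dict String String) (uri : String) :
    PySem.Dict String Int × PySem.Dict String String :=
  let b := pvBaseName uri
  match st.1.get? b with
  | none => (st.1.insert b 1, st.2.insert uri b)
  | some k => (st.1.insert b (k + 1), st.2.insert uri (b ++ " (" ++ PySem.Int.toStr k ++ ")"))

def generate_unique_attr_names_py (uris : List String) : List (String × String) :=
  (((PySem.List.sorted uris (fun x => x) false).foldl pvStepA
      (PySem.Dict.empty, PySem.Dict.empty)).2).items

-- ===== PORT B =====
-- groups.setdefault(base, []).append(uri): groups[base] becomes groups.get(base, []) + [uri]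
-- with the key's position unchanged — exactly Dict.modify
def pvGroups (ordered : List String) : PySem.Dict String (List String) :=
  ordered.foldl (fun g u => g.modify (pvBaseName u) [] (fun ms => ms ++ [u])) PySem.Dict.empty

-- base if i == 0 else f"{base} ({i})"
def pvFmtI (b : String) (i : Int) : String :=
  if i = 0 then b else b ++ " (" ++ PySem.Int.toStr i ++ ")"

def pvNameFor (gs : List (String × List String)) : PySem.Dict String String :=
  gs.foldl (fun nf bm =>
    (PySem.List.enumerate bm.2 0).foldl (fun nf iu => nf.insert iu.2 (pvFmtI bm.1 iu.1)) nf)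
    PySem.Dict.empty

def generate_unique_attr_names_py_alt (uris : List String) : List (String × String) :=
  let ordered := PySem.List.sorted uris (fun x => x) false
  let nameFor := pvNameFor (pvGroups ordered).items
  -- name_for[uri]: every uri of 'ordered' was named in some group, so the key is always
  -- present and getD's default "" is never used (Python's [] would raise only on a miss)
  ((PySem.List.dedup ordered).foldl (fun m u => m.insert u (nameFor.getD u "")) PySem.Dict.empty).items

-- ===== PRECONDITION & SPEC =====
def Spec_generate_unique_attr_names_py (uris : List String) (out : List (String × String)) : Prop := out = generate_unique_attr_names_py_alt uris
instance (uris : List String) (out : List (String × String)) : Decidable (Spec_generate_unique_attr_names_py uris out) := by unfold Spec_generate_unique_attr_names_py; infer_instance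

-- ===== CLAIM (what is proved, stated in full; the proofs are below) =====
def Claim_equal_generate_unique_attr_names_py : Prop := ∀ (uris : List String), Dom_generate_unique_attr_names_py uris → Spec_generate_unique_attr_names_py uris (generate_unique_attr_names_py uris)

-- ===== LEMMAS AND PROOFS =====

-- pvFmtI at a Nat index
def pvFmtN (b : String) (n : Nat) : String := pvFmtI b (n : Int)

-- index of the LAST occurrence of u in ms (meaningful only when u ∈ ms)
def pvPos : List String → String → Nat
  | [], _ => 0
  | _ :: ms, u => if u ∈ ms then pvPos ms u + 1 else 0

-- the final name both programs give uri u when the processed list is l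
def pvVal (l : List String) (u : String) : String :=
  pvFmtN (pvBaseName u) (pvPos (l.filter (fun v => pvBaseName v == pvBaseName u)) u)

-- common normal form of both result dicts' items
def pvF (l : List String) : List (String × String) :=
  (PySem.List.dedup l).map (fun u => (u, pvVal l u))

-- reference fold for the A side: carry the bases of the processed prefix
def pvSpecStep (st : List String × PySem.Dict String String) (u : String) :
    List String × PySem.Dict String String :=
  let b := pvBaseName u
  (st.1 ++ [b], st.2.insert u (pvFmtN b (st.1.count b)))

theorem pvSpec_fst (l : List String) (done : List String) (m : PySem.Dict String String) :
    (l.foldl pvSpecStep (done, m)).1 = done ++ l.map pvBaseName := by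
  induction l generalizing done m with
  | nil => simp
  | cons u t ih => simp [pvSpecStep, ih]

theorem pvA_eq_spec (l : List String) (done : List String)
    (used : PySem.Dict String Int) (m : PySem.Dict String String)
    (h : ∀ b, used.get? b = if done.count b = 0 then none else some (done.count b : Int)) :
    (l.foldl pvStepA (used, m)).2 = (l.foldl pvSpecStep (done, m)).2 := by
  induction l generalizing done used m with
  | nil => rfl
  | cons u t ih =>
    have hb := h (pvBaseName u)
    simp only [List.foldl_cons, pvStepA, pvSpecStep]
    by_cases hz : done.count (pvBaseName u) = 0
    · rw [hb]; simp only [hz, reduceIte, pvFmtN, pvFmtI, Nat.cast_zero]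
      apply ih
      intro b
      by_cases hbe : b = pvBaseName u
      · subst hbe
        rw [PySem.Dict.get?_insert_self, List.count_append]
        simp [hz]
      · have hxb : ¬ pvBaseName u = b := fun h' => hbe h'.symm
        rw [PySem.Dict.get?_insert_of_ne _ _ hbe, h b, List.count_append]
        simp [hxb]
    · rw [hb]; simp only [hz, reduceIte, pvFmtN, pvFmtI]
      rw [if_neg (by exact_mod_cast hz)]
      apply ih
      intro b
      by_cases hbe : b = pvBaseName u
      · subst hbe
        rw [PySem.Dict.get?_insert_self, List.count_append]
        simp [hz]
      · have hxb : ¬ pvBaseName u = b := fun h' => hbe h'.symm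
        rw [PySem.Dict.get?_insert_of_ne _ _ hbe, h b, List.count_append]
        simp [hxb]

theorem pvPos_append_self (ms : List String) (u : String) :
    pvPos (ms ++ [u]) u = ms.length := by
  induction ms with
  | nil => simp [pvPos]
  | cons v ms ih => simp [pvPos, ih]

theorem pvPos_append_of_ne (ms : List String) {v u : String} (h : v ≠ u) :
    pvPos (ms ++ [u]) v = pvPos ms v := by
  induction ms with
  | nil => simp [pvPos]
  | cons w ms ih =>
    simp only [List.cons_append, pvPos, List.mem_append, List.mem_singleton, h, or_false, ih]

theorem pvDedup_append (l : List String) (u : String) :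
    PySem.List.dedup (l ++ [u]) =
      if u ∈ l then PySem.List.dedup l else PySem.List.dedup l ++ [u] := by
  simp only [PySem.List.dedup_eq_ofList, PySem.Set.ofList_eq_foldl, List.foldl_append,
    List.foldl_cons, List.foldl_nil]
  rw [← PySem.Set.ofList_eq_foldl]
  show PySem.Set.add (PySem.Set.ofList l) u = _
  unfold PySem.Set.add
  by_cases hm : u ∈ l
  · rw [if_pos (by simpa [PySem.Set.contains] using (PySem.Set.mem_ofList l u).mpr hm), if_pos hm]
  · rw [if_neg (by simpa [PySem.Set.contains] using fun h => hm ((PySem.Set.mem_ofList l u).mp h)), if_neg hm]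

theorem pvVal_append_of_ne (l : List String) {v u : String} (h : v ≠ u) :
    pvVal (l ++ [u]) v = pvVal l v := by
  unfold pvVal
  rw [List.filter_append]
  by_cases hb : pvBaseName u == pvBaseName v
  · simp only [List.filter_cons, List.filter_nil, hb, if_true]
    rw [pvPos_append_of_ne _ h]
  · simp [hb]

theorem pvVal_append_self (l : List String) (u : String) :
    pvVal (l ++ [u]) u =
      pvFmtN (pvBaseName u) ((l.map pvBaseName).count (pvBaseName u)) := by
  unfold pvVal
  rw [List.filter_append]
  simp only [List.filter_cons, List.filter_nil, beq_self_eq_true, reduceIte]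
  rw [pvPos_append_self]
  congr 1
  rw [List.count_eq_countP, ← List.countP_eq_length_filter, List.countP_map]
  rfl

theorem pvSpec_items (l : List String) :
    (l.foldl pvSpecStep ([], PySem.Dict.empty)).2.items = pvF l := by
  induction l using List.reverseRecOn with
  | nil => rfl
  | append_singleton l u ih =>
    rw [List.foldl_append, List.foldl_cons, List.foldl_nil]
    have hfst := pvSpec_fst l [] PySem.Dict.empty
    simp only [List.nil_append] at hfst
    simp only [pvSpecStep, hfst]
    have hkeys : (l.foldl pvSpecStep ([], PySem.Dict.empty)).2.keys = PySem.List.dedup l := by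
      show ((l.foldl pvSpecStep ([], PySem.Dict.empty)).2.items).map (·.1) = _
      rw [ih]; unfold pvF; rw [List.map_map, PySem.List.dedup_eq_ofList,
        show ((fun x : String × String => x.1) ∘ fun u => (u, pvVal l u)) = fun v => v from rfl,
        List.map_id']
    by_cases hm : u ∈ l
    · have hc : (l.foldl pvSpecStep ([], PySem.Dict.empty)).2.contains u = true := by
        rw [PySem.Dict.contains_eq_decide_mem_keys, hkeys]
        simp [PySem.List.dedup_eq_ofList, PySem.Set.mem_ofList, hm]
      rw [PySem.Dict.items_insert_of_contains _ _ hc, ih]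
      unfold pvF
      rw [pvDedup_append, if_pos hm, List.map_map]
      apply List.map_congr_left
      intro v hv
      by_cases hvu : v = u
      · subst hvu
        simp only [Function.comp, beq_self_eq_true, reduceIte]
        rw [pvVal_append_self]
      · simp only [Function.comp]
        rw [if_neg (by simpa using hvu), pvVal_append_of_ne _ hvu]
    · have hc : (l.foldl pvSpecStep ([], PySem.Dict.empty)).2.contains u = false := by
        rw [PySem.Dict.contains_eq_decide_mem_keys, hkeys]
        simp [PySem.List.dedup_eq_ofList, PySem.Set.mem_ofList, hm]
      rw [PySem.Dict.items_insert_of_not_contains _ _ hc, ih]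
      unfold pvF
      rw [pvDedup_append, if_neg hm, List.map_append]
      congr 1
      · apply List.map_congr_left
        intro v hv
        have hvu : v ≠ u := by
          intro h'; subst h'
          exact hm ((PySem.List.mem_dedup l v).mp hv)
        rw [pvVal_append_of_ne _ hvu]
      · simp [pvVal_append_self]

-- B side
theorem pvGroups_getD (l : List String) (b : String) :
    (pvGroups l).getD b [] = l.filter (fun v => pvBaseName v == b) := by
  unfold pvGroups
  have : l.foldl (fun g u => g.modify (pvBaseName u) [] (fun ms => ms ++ [u]))
      (PySem.Dict.empty : PySem.Dict String (List String))
      = (l.map (fun u => (pvBaseName u, u))).foldl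
          (fun d p => d.modify p.1 [] (fun x => x ++ [p.2])) PySem.Dict.empty := by
    rw [List.foldl_map]
  rw [this, PySem.Dict.getD_foldl_modify_append]
  rw [List.filter_map, List.map_map]
  simp only [Function.comp_def, PySem.Dict.getD_empty, List.nil_append]
  exact List.map_id' _

theorem pvGroups_items (l : List String) :
    (pvGroups l).items =
      (PySem.List.dedup (l.map pvBaseName)).map
        (fun b => (b, l.filter (fun v => pvBaseName v == b))) := by
  have hnd : (pvGroups l).keys.Nodup := by
    unfold pvGroups
    exact PySem.Dict.nodup_keys_foldl_modify_key l pvBaseName []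
      (fun g u ms => ms ++ [u]) PySem.Dict.empty (by simp)
  have hkeys : (pvGroups l).keys = PySem.List.dedup (l.map pvBaseName) := by
    unfold pvGroups
    rw [PySem.Dict.keys_foldl_modify_key l pvBaseName [] (fun g u ms => ms ++ [u])]
    rw [PySem.List.dedup_eq_ofList]
    simp [PySem.Set.update, PySem.Set.ofList_eq_foldl]
  rw [PySem.Dict.items_eq_map_keys _ hnd [], hkeys]
  apply List.map_congr_left
  intro b _
  rw [pvGroups_getD]

theorem pvInner_get? (b : String) (ms : List String) (s : Int)
    (nf : PySem.Dict String String) (u : String) :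
    ((PySem.List.enumerate ms s).foldl (fun nf iu => nf.insert iu.2 (pvFmtI b iu.1)) nf).get? u
      = if u ∈ ms then some (pvFmtI b (s + (pvPos ms u : Int))) else nf.get? u := by
  induction ms generalizing s nf with
  | nil => simp [PySem.List.enumerate]
  | cons v ms ih =>
    rw [PySem.List.enumerate_cons, List.foldl_cons, ih]
    by_cases hm : u ∈ ms
    · rw [if_pos hm, if_pos (List.mem_cons_of_mem _ hm)]
      have : pvPos (v :: ms) u = pvPos ms u + 1 := by simp [pvPos, hm]
      rw [this]
      congr 1
      push_cast
      ring_nf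
    · rw [if_neg hm]
      by_cases hv : u = v
      · subst hv
        rw [PySem.Dict.get?_insert_self, if_pos (List.mem_cons_self)]
        have : pvPos (u :: ms) u = 0 := by simp [pvPos, hm]
        rw [this]
        norm_num
      · rw [PySem.Dict.get?_insert_of_ne _ _ hv,
          if_neg (by simp [hv, hm])]

theorem pvSkip_get? (gs : List (String × List String)) (nf : PySem.Dict String String)
    (u : String) (h : ∀ p ∈ gs, u ∉ p.2) :
    (gs.foldl (fun nf bm =>
        (PySem.List.enumerate bm.2 0).foldl (fun nf iu => nf.insert iu.2 (pvFmtI bm.1 iu.1)) nf)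
      nf).get? u = nf.get? u := by
  induction gs generalizing nf with
  | nil => rfl
  | cons g gs ih =>
    rw [List.foldl_cons, ih _ (fun p hp => h p (List.mem_cons_of_mem _ hp)),
      pvInner_get?, if_neg (h g List.mem_cons_self)]

theorem pvNameFor_get? (l : List String) (u : String) (hu : u ∈ l) :
    (pvNameFor (pvGroups l).items).get? u = some (pvVal l u) := by
  unfold pvNameFor
  rw [pvGroups_items]
  have hmem : pvBaseName u ∈ PySem.List.dedup (l.map pvBaseName) := by
    rw [PySem.List.dedup_eq_ofList, PySem.Set.mem_ofList]
    exact List.mem_map_of_mem hu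
  obtain ⟨ks1, ks2, hsp⟩ := List.append_of_mem hmem
  have hnd : (PySem.List.dedup (l.map pvBaseName)).Nodup := PySem.List.nodup_dedup _
  rw [hsp] at hnd
  rw [List.nodup_append] at hnd
  have hnb1 : pvBaseName u ∉ ks1 := fun h1 => hnd.2.2 _ h1 _ List.mem_cons_self rfl
  have hnb2 : pvBaseName u ∉ ks2 := ((List.nodup_cons).mp hnd.2.1).1
  rw [hsp, List.map_append, List.map_cons, List.foldl_append, List.foldl_cons]
  rw [pvSkip_get? _ _ u (by
    intro p hp
    obtain ⟨b, hb, rfl⟩ := List.mem_map.mp hp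
    intro hup
    have : pvBaseName u == b := (List.mem_filter.mp hup).2
    exact hnb2 (by rwa [eq_of_beq this]))]
  rw [pvInner_get?]
  have humem : u ∈ l.filter (fun v => pvBaseName v == pvBaseName u) :=
    List.mem_filter.mpr ⟨hu, beq_self_eq_true _⟩
  rw [if_pos humem]
  unfold pvVal pvFmtN
  norm_num

theorem pvB_items (l : List String) :
    ((PySem.List.dedup l).foldl
        (fun m u => m.insert u ((pvNameFor (pvGroups l).items).getD u "")) PySem.Dict.empty).items
      = pvF l := by
  rw [PySem.Dict.items_foldl_insert_fresh (PySem.List.dedup l) (fun u => u)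
      (fun u => (pvNameFor (pvGroups l).items).getD u "") PySem.Dict.empty
      (fun a _ => PySem.Dict.contains_empty a)
      (by simp)]
  unfold pvF
  have hemp : (PySem.Dict.empty : PySem.Dict String String).items = [] := rfl
  rw [hemp, List.nil_append]
  apply List.map_congr_left
  intro v hv
  have hvl : v ∈ l := (PySem.List.mem_dedup l v).mp hv
  rw [PySem.Dict.getD_eq_get?_getD, pvNameFor_get? l v hvl]
  rfl

-- ===== VERDICT (by name: the statement is the Claim_ definition above) =====
theorem generate_unique_attr_names_py_spec : Claim_equal_generate_unique_attr_names_py := by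
  intro uris _
  unfold Spec_generate_unique_attr_names_py generate_unique_attr_names_py generate_unique_attr_names_py_alt
  have hA := pvA_eq_spec (PySem.List.sorted uris (fun x => x) false) []
      PySem.Dict.empty PySem.Dict.empty (by intro b; simp)
  rw [hA, pvSpec_items, ← pvB_items]
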